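-- pv_equiv track=rewrite | github.com/schrodingerskatt/DSA-problems | greedy/construct_DI_string.py | smallestNumber
-- ===== SOURCE A (Python) =====
-- def smallestNumber(pattern: str) -> str:
--
--     s =""
--     n = len(pattern)
--     for i in range(1,n+2):
--         s+=str(i)
--     i,d = 0,0
--
--     while i < len(pattern):
--         if pattern[i]=='I':
--             i+=1
--         else:
--             j = i
--             while j < n and pattern[j]=='D':
--                 j+=1
--             s =  s[:i] + s[i:j + 1][::-1] + s[j + 1:]
--             i = j+1
--     return s
-- ===== SOURCE B (Python) =====
-- def smallestNumber(pattern: str) -> str: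
--     n = len(pattern)
--     base = "".join(str(i) for i in range(1, n + 2))
--     out = []
--     stack = []
--     for k, ch in enumerate(base):
--         stack.append(ch)
--         if k >= n or pattern[k] != 'D':
--             while stack:
--                 out.append(stack.pop())
--     return "".join(out)
-- ===== Notes on version B (the rewrite author's own statement) =====
-- stated objective: faster
-- what changed: Replaced the O(n^2) rebuild-the-whole-string-per-D-run slicing loop with a single O(n) pass that pushes base characters on a stack and flushes it at each non-'D' position or at the end, so each character is touched O(1) times.
import Mathlib
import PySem

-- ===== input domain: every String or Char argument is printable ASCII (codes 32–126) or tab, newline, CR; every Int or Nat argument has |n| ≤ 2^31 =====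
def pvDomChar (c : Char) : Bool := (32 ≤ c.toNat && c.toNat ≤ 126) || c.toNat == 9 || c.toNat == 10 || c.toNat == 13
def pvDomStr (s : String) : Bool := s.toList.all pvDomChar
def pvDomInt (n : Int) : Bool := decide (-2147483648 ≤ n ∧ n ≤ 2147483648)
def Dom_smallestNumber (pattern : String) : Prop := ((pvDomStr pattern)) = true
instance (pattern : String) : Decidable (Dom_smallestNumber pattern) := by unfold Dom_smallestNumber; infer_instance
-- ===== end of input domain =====

-- B replaces A's quadratic rebuild-the-string-per-'D'-run slicing loop by a single
-- stack-based pass over the base string (objective: faster, measured asymptotic).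
-- String code is ported on the List Char side (PySem's string representation) and
-- wrapped with String.ofList at the end.

-- ===== PORT A =====
-- inner while:  j = i;  while j < n and pattern[j] == 'D': j += 1
-- (pattern[j] is guarded by j < n, so List.getD is exact here)
def pvScanD (p : List Char) (n j : Nat) : Nat :=
  if h : j < n ∧ p.getD j ' ' = 'D' then pvScanD p n (j + 1) else j
termination_by n - j
decreasing_by omega

-- termination fact for the outer while loop (i jumps to pvScanD … + 1)
theorem pvScanD_ge (p : List Char) (n j : Nat) : j ≤ pvScanD p n j := by
  fun_induction pvScanD with
  | case1 h ih => omega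
  | case2 h => omega

-- outer while:  slices ported with PySem.List.slice; s[i:j+1][::-1] is the reverse of
-- the slice (PySem.List.slice?_none_none_neg_one)
def pvLoopA (p : List Char) (n : Nat) (s : List Char) (i : Nat) : List Char :=
  if _h : i < p.length then
    if PySem.List.pyGetD p (i : Int) ' ' = 'I' then pvLoopA p n s (i + 1)
    else
      let j := pvScanD p n i
      let s' := PySem.List.slice s none (some (i : Int)) ++
                (PySem.List.slice s (some (i : Int)) (some ((j : Int) + 1))).reverse ++
                PySem.List.slice s (some ((j : Int) + 1)) none
      pvLoopA p n s' (j + 1)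
  else s
termination_by p.length - i
decreasing_by
  · omega
  · have := pvScanD_ge p n i; omega

def smallestNumber (pattern : String) : String :=
  let p := pattern.toList
  let n := p.length
  -- s = "";  for i in range(1, n+2): s += str(i)
  let s := (PySem.List.pyRange 1 ((n : Int) + 2) 1).foldl
             (fun s i => s ++ (PySem.Int.toStr i).toList) []
  String.ofList (pvLoopA p n s 0)

-- ===== PORT B =====
-- one enumerate step: push the char; on k >= n or pattern[k] != 'D' flush the stack
-- ("while stack: out.append(stack.pop())" appends the reversed stack)
def pvStep (p : List Char) (n : Nat) (st : List Char × List Char) (kc : Int × Char) :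
    List Char × List Char :=
  let stack := st.2 ++ [kc.2]
  if kc.1 ≥ (n : Int) ∨ PySem.List.pyGetD p kc.1 ' ' ≠ 'D' then (st.1 ++ stack.reverse, [])
  else (st.1, stack)

def smallestNumber_alt (pattern : String) : String :=
  let p := pattern.toList
  let n := p.length
  -- base = "".join(str(i) for i in range(1, n+2))
  let base := PySem.Chars.join []
                ((PySem.List.pyRange 1 ((n : Int) + 2) 1).map (fun i => (PySem.Int.toStr i).toList))
  let res := (PySem.List.enumerate base 0).foldl (pvStep p n) ([], [])
  String.ofList res.1

-- ===== PRECONDITION & SPEC =====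
def Spec_smallestNumber (pattern : String) (out : String) : Prop := out = smallestNumber_alt pattern
instance (pattern : String) (out : String) : Decidable (Spec_smallestNumber pattern out) := by unfold Spec_smallestNumber; infer_instance

-- ===== CLAIM (what is proved, stated in full; the proofs are below) =====
def Claim_equal_smallestNumber : Prop := ∀ (pattern : String), Dom_smallestNumber pattern → Spec_smallestNumber pattern (smallestNumber pattern)

-- ===== LEMMAS AND PROOFS =====

-- length of the leading run of 'D's
def pvDRun : List Char → Nat
  | [] => 0
  | c :: t => if c = 'D' then pvDRun t + 1 else 0

-- common specification of both programs: reverse each maximal-'D'-run segment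
-- (run plus its terminating position) of the base string
def pvG : List Char → List Char → List Char
  | [], base => base
  | c :: rest, base =>
    if c = 'D' then
      (base.take (pvDRun (c :: rest) + 1)).reverse ++
        pvG ((c :: rest).drop (pvDRun (c :: rest) + 1)) (base.drop (pvDRun (c :: rest) + 1))
    else
      match base with
      | [] => []
      | b :: bt => b :: pvG rest bt
termination_by p _ => p.length
decreasing_by
  · simp
  · simp

theorem pvG_nil (base : List Char) : pvG [] base = base := by
  rw [pvG.eq_def]

theorem pvG_D (c : Char) (rest base : List Char) (h : c = 'D') :
    pvG (c :: rest) base =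
      (base.take (pvDRun (c :: rest) + 1)).reverse ++
        pvG ((c :: rest).drop (pvDRun (c :: rest) + 1)) (base.drop (pvDRun (c :: rest) + 1)) := by
  rw [pvG.eq_def]
  simp [h]

theorem pvG_not_D (c : Char) (rest : List Char) (b : Char) (bt : List Char) (h : ¬ c = 'D') :
    pvG (c :: rest) (b :: bt) = b :: pvG rest bt := by
  rw [pvG.eq_def]
  simp [h]

theorem pvDRun_le (l : List Char) : pvDRun l ≤ l.length := by
  induction l with
  | nil => simp [pvDRun]
  | cons c t ih => simp only [pvDRun]; split <;> simp; omega

theorem pvDRun_mem (l : List Char) (q : Nat) (hq : q < pvDRun l) :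
    q < l.length ∧ l.getD q ' ' = 'D' := by
  induction l generalizing q with
  | nil => simp [pvDRun] at hq
  | cons c t ih =>
    simp only [pvDRun] at hq
    split at hq
    · cases q with
      | zero => simpa using ‹c = 'D'›
      | succ q =>
        have := ih q (by omega)
        simpa using this
    · omega

theorem pvDRun_stop (l : List Char) :
    pvDRun l = l.length ∨ l.getD (pvDRun l) ' ' ≠ 'D' := by
  induction l with
  | nil => simp [pvDRun]
  | cons c t ih =>
    simp only [pvDRun]
    split
    · rcases ih with h | h
      · left; simp [h]
      · right; simpa using h
    · right; simpa using ‹¬ c = 'D'›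

theorem pvScanD_eq (p : List Char) (i : Nat) :
    pvScanD p p.length i = i + pvDRun (p.drop i) := by
  by_cases h : i < p.length ∧ p.getD i ' ' = 'D'
  · have hrec := pvScanD_eq p (i + 1)
    have hdrop : p.drop i = p[i] :: p.drop (i + 1) := (List.getElem_cons_drop h.1).symm
    have hc : p[i] = 'D' := by
      have hgd := List.getD_eq_getElem p ' ' h.1
      rw [← hgd]; exact h.2
    rw [pvScanD, dif_pos h, hrec, hdrop, pvDRun, if_pos hc]
    omega
  · rw [pvScanD, dif_neg h]
    suffices hz : pvDRun (p.drop i) = 0 by omega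
    by_cases hl : i < p.length
    · have hdrop : p.drop i = p[i] :: p.drop (i + 1) := (List.getElem_cons_drop hl).symm
      have hc : p[i] ≠ 'D' := by
        intro hcontra
        exact h ⟨hl, by rw [List.getD_eq_getElem p ' ' hl]; exact hcontra⟩
      rw [hdrop, pvDRun, if_neg hc]
    · rw [List.drop_of_length_le (by omega)]; rfl
termination_by p.length - i
decreasing_by omega

theorem pvLoopA_eq (p : List Char) (pre rest : List Char)
    (hlen : p.length < pre.length + rest.length) :
    pvLoopA p p.length (pre ++ rest) pre.length = pre ++ pvG (p.drop pre.length) rest := by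
  by_cases hk : pre.length < p.length
  · have hdropP : p.drop pre.length = p[pre.length] :: p.drop (pre.length + 1) :=
      (List.getElem_cons_drop hk).symm
    have hgd : PySem.List.pyGetD p (pre.length : Int) ' ' = p[pre.length] := by
      simp [List.getElem?_eq_getElem hk]
    cases rest with
    | nil => simp at hlen; omega
    | cons b bt =>
      rw [pvLoopA, dif_pos hk, hgd]
      by_cases hI : p[pre.length] = 'I'
      · rw [if_pos hI]
        have hstep : pre ++ b :: bt = (pre ++ [b]) ++ bt := by simp
        have hl1 : pre.length + 1 = (pre ++ [b]).length := by simp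
        rw [hstep, hl1, pvLoopA_eq p (pre ++ [b]) bt (by simp; simp at hlen; omega)]
        have hND : ¬ p[pre.length] = 'D' := by rw [hI]; decide
        rw [hdropP, pvG_not_D _ _ _ _ hND]
        simp [List.length_append]
      · rw [if_neg hI]
        have hj : pvScanD p p.length pre.length = pre.length + pvDRun (p.drop pre.length) :=
          pvScanD_eq p pre.length
        have hrle : pvDRun (p.drop pre.length) ≤ p.length - pre.length := by
          have := pvDRun_le (p.drop pre.length); simpa using this
        have hr2 : pvDRun (p.drop pre.length) + 1 ≤ (b :: bt).length := by
          simp; simp at hlen; omega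
        simp only [hj]
        -- the three slices of s = pre ++ rest
        have hs1 : PySem.List.slice (pre ++ b :: bt) none (some (pre.length : Int)) = pre := by
          rw [PySem.List.slice_to_natCast, List.take_left]
        have hc1 : (((pre.length + pvDRun (p.drop pre.length) : Nat) : Int) + 1) =
            ((pre.length + pvDRun (p.drop pre.length) + 1 : Nat) : Int) := by push_cast; ring
        have hs2 : PySem.List.slice (pre ++ b :: bt) (some (pre.length : Int))
            (some (((pre.length + pvDRun (p.drop pre.length) : Nat) : Int) + 1)) =
            (b :: bt).take (pvDRun (p.drop pre.length) + 1) := by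
          rw [hc1, PySem.List.slice_natCast, List.drop_left]
          have e2 : pre.length + pvDRun (p.drop pre.length) + 1 - pre.length =
              pvDRun (p.drop pre.length) + 1 := by omega
          rw [e2]
        have hs3 : PySem.List.slice (pre ++ b :: bt)
            (some (((pre.length + pvDRun (p.drop pre.length) : Nat) : Int) + 1)) none =
            (b :: bt).drop (pvDRun (p.drop pre.length) + 1) := by
          have hple : pre.length ≤ pre.length + pvDRun (p.drop pre.length) + 1 := by omega
          rw [hc1, PySem.List.slice_from_natCast, List.drop_append,
            List.drop_of_length_le hple]
          have e2 : pre.length + pvDRun (p.drop pre.length) + 1 - pre.length =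
              pvDRun (p.drop pre.length) + 1 := by omega
          rw [e2]
          simp
        rw [hs1, hs2, hs3]
        have hassoc : pre ++ ((b :: bt).take (pvDRun (p.drop pre.length) + 1)).reverse ++
            (b :: bt).drop (pvDRun (p.drop pre.length) + 1) =
            (pre ++ ((b :: bt).take (pvDRun (p.drop pre.length) + 1)).reverse) ++
            (b :: bt).drop (pvDRun (p.drop pre.length) + 1) := by
          simp [List.append_assoc]
        have hl2 : pre.length + pvDRun (p.drop pre.length) + 1 =
            (pre ++ ((b :: bt).take (pvDRun (p.drop pre.length) + 1)).reverse).length := by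
          rw [List.length_append, List.length_reverse, List.length_take,
            Nat.min_eq_left hr2]
          omega
        rw [hassoc, hl2, pvLoopA_eq p
          (pre ++ ((b :: bt).take (pvDRun (p.drop pre.length) + 1)).reverse)
          ((b :: bt).drop (pvDRun (p.drop pre.length) + 1))
          (by simp [List.length_append]; simp at hlen; omega)]
        rw [← hl2]
        by_cases hD : p[pre.length] = 'D'
        · rw [hdropP, pvG_D _ _ _ hD, ← hdropP, List.drop_drop]
          have e1 : pre.length + pvDRun (p.drop pre.length) + 1 =
              pre.length + (pvDRun (p.drop pre.length) + 1) := by omega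
          rw [e1]
          simp [List.append_assoc]
        · have hr0 : pvDRun (p.drop pre.length) = 0 := by
            rw [hdropP]; simp only [pvDRun, if_neg hD]
          rw [hr0, hdropP, pvG_not_D _ _ _ _ hD]
          simp
  · rw [pvLoopA, dif_neg hk, List.drop_of_length_le (by omega), pvG_nil]
termination_by p.length - pre.length
decreasing_by all_goals simp [List.length_append, List.length_take]; omega

theorem pvB_pops (p : List Char) (bs : List Char) :
    ∀ (k : Int) (out : List Char), (p.length : Int) ≤ k →
      (PySem.List.enumerate bs k).foldl (pvStep p p.length) (out, []) = (out ++ bs, []) := by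
  induction bs with
  | nil => intro k out _; simp [PySem.List.enumerate]
  | cons b bt ih =>
    intro k out h
    rw [PySem.List.enumerate_cons, List.foldl_cons]
    have hstep : pvStep p p.length (out, []) (k, b) = (out ++ [b], []) := by
      simp only [pvStep]
      rw [if_pos (Or.inl (by simpa using h))]
      simp
    rw [hstep, ih (k + 1) (out ++ [b]) (by omega)]
    simp

theorem pvB_run (p : List Char) (r : Nat) :
    ∀ (k : Nat) (st out bs : List Char),
      (∀ q, q < r → k + q < p.length ∧ p.getD (k + q) ' ' = 'D') →
      (p.length ≤ k + r ∨ p.getD (k + r) ' ' ≠ 'D') →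
      r + 1 ≤ bs.length →
      (PySem.List.enumerate bs (k : Int)).foldl (pvStep p p.length) (out, st) =
        (PySem.List.enumerate (bs.drop (r + 1)) ((k : Int) + (r : Int) + 1)).foldl
          (pvStep p p.length) (out ++ (st ++ bs.take (r + 1)).reverse, []) := by
  induction r with
  | zero =>
    intro k st out bs _ hb hlen
    cases bs with
    | nil => simp at hlen
    | cons b bt =>
      rw [PySem.List.enumerate_cons, List.foldl_cons]
      have hstep : pvStep p p.length (out, st) ((k : Int), b) = (out ++ (st ++ [b]).reverse, []) := by
        simp only [pvStep]
        rcases hb with hb | hb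
        · rw [if_pos (Or.inl (by simp; omega))]
        · rw [if_pos (Or.inr (by simpa using hb))]
      rw [hstep]
      simp
  | succ r ih =>
    intro k st out bs hrun hb hlen
    cases bs with
    | nil => simp at hlen
    | cons b bt =>
      rw [PySem.List.enumerate_cons, List.foldl_cons]
      obtain ⟨h0l, h0D⟩ := hrun 0 (by omega)
      have hstep : pvStep p p.length (out, st) ((k : Int), b) = (out, st ++ [b]) := by
        simp only [pvStep]
        rw [if_neg]
        push Not
        constructor
        · simp; omega
        · simpa using h0D
      rw [hstep]
      have hcast : ((k : Int) + 1) = ((k + 1 : Nat) : Int) := by push_cast; ring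
      rw [hcast]
      rw [ih (k + 1) (st ++ [b]) out bt
        (by intro q hq
            have e : k + 1 + q = k + (q + 1) := by omega
            rw [e]; exact hrun (q + 1) (by omega))
        (by rcases hb with hb | hb
            · left; omega
            · right
              have e : k + 1 + r = k + (r + 1) := by omega
              rw [e]; exact hb)
        (by simp at hlen ⊢; omega)]
      have e1 : ((k + 1 : Nat) : Int) + (r : Int) + 1 = (k : Int) + ((r + 1 : Nat) : Int) + 1 := by
        push_cast; ring
      rw [e1]
      simp [List.take_succ_cons, List.drop_succ_cons, List.append_assoc]

theorem pvGetD_drop (l : List Char) (n q : Nat) (d : Char) :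
    (l.drop n).getD q d = l.getD (n + q) d := by
  simp [List.getD, List.getElem?_drop]

theorem pvLoopB_eq (p : List Char) (k : Nat) (bs out : List Char)
    (hlen : p.length < k + bs.length) :
    (PySem.List.enumerate bs (k : Int)).foldl (pvStep p p.length) (out, []) =
      (out ++ pvG (p.drop k) bs, []) := by
  by_cases hk : k < p.length
  · have hdrop : p.drop k = p[k] :: p.drop (k + 1) := (List.getElem_cons_drop hk).symm
    by_cases hD : p[k] = 'D'
    · -- a 'D' run of length r ≥ 1 starts at k
      have hr1 : 1 ≤ pvDRun (p.drop k) := by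
        rw [hdrop]; simp only [pvDRun, if_pos hD]; omega
      have hrle : pvDRun (p.drop k) ≤ p.length - k := by
        have := pvDRun_le (p.drop k); simpa using this
      have hrun : ∀ q, q < pvDRun (p.drop k) → k + q < p.length ∧ p.getD (k + q) ' ' = 'D' := by
        intro q hq
        obtain ⟨h1, h2⟩ := pvDRun_mem (p.drop k) q hq
        rw [pvGetD_drop] at h2
        simp at h1
        exact ⟨by omega, h2⟩
      have hb : p.length ≤ k + pvDRun (p.drop k) ∨ p.getD (k + pvDRun (p.drop k)) ' ' ≠ 'D' := by
        rcases pvDRun_stop (p.drop k) with h | h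
        · left; simp at h; omega
        · right; rwa [pvGetD_drop] at h
      rw [pvB_run p (pvDRun (p.drop k)) k [] out bs hrun hb (by omega)]
      have hcast : ((k : Int) + (pvDRun (p.drop k) : Int) + 1) =
          ((k + pvDRun (p.drop k) + 1 : Nat) : Int) := by push_cast; ring
      rw [hcast]
      have hr2 : pvDRun (p.drop k) + 1 ≤ bs.length := by omega
      have hlen2 : p.length < (k + pvDRun (p.drop k) + 1) +
          (bs.drop (pvDRun (p.drop k) + 1)).length := by
        rw [List.length_drop]; omega
      have hrec := pvLoopB_eq p (k + pvDRun (p.drop k) + 1) (bs.drop (pvDRun (p.drop k) + 1))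
        (out ++ ([] ++ bs.take (pvDRun (p.drop k) + 1)).reverse) hlen2
      rw [hrec]
      rw [hdrop, pvG_D _ _ _ hD, ← hdrop]
      rw [List.drop_drop]
      have e : k + (pvDRun (p.drop k) + 1) = k + pvDRun (p.drop k) + 1 := by omega
      rw [e]
      simp [List.append_assoc]
    · -- pattern[k] is not 'D': single flush step
      cases bs with
      | nil => simp at hlen; omega
      | cons b bt =>
        rw [PySem.List.enumerate_cons, List.foldl_cons]
        have hnd : p.getD k ' ' ≠ 'D' := by
          rw [List.getD_eq_getElem p ' ' hk]; exact hD
        have hstep : pvStep p p.length (out, []) ((k : Int), b) = (out ++ [b], []) := by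
          simp only [pvStep]
          rw [if_pos (Or.inr (by simpa using hnd))]
          simp
        rw [hstep]
        have hcast : ((k : Int) + 1) = ((k + 1 : Nat) : Int) := by push_cast; ring
        rw [hcast, pvLoopB_eq p (k + 1) bt (out ++ [b]) (by simp at hlen; omega)]
        rw [hdrop, pvG_not_D _ _ _ _ hD]
        simp
  · rw [pvB_pops p bs k out (by exact_mod_cast Nat.le_of_not_lt hk)]
    rw [List.drop_of_length_le (by omega), pvG_nil]
termination_by p.length - k
decreasing_by all_goals omega

theorem pvIntersperse_nil_flatten (l : List (List Char)) :
    (List.intersperse ([] : List Char) l).flatten = l.flatten := by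
  induction l with
  | nil => simp
  | cons a t ih => cases t <;> simp_all

theorem pvJoin_nil (parts : List (List Char)) :
    PySem.Chars.join [] parts = parts.flatten := by
  simp [PySem.Chars.join, List.intercalate, pvIntersperse_nil_flatten]

theorem pvToDigitsCore_len (b fuel : Nat) :
    ∀ n ds, ds.length ≤ (Nat.toDigitsCore b fuel n ds).length := by
  induction fuel with
  | zero => intro n ds; simp [Nat.toDigitsCore]
  | succ f ih =>
    intro n ds
    rw [Nat.toDigitsCore]
    split
    · simp
    · have := ih (n / b) ((n % b).digitChar :: ds)
      simp at this; omega

theorem pvToChars_ne_nil (i : Int) (h : 1 ≤ i) : PySem.Int.toChars i ≠ [] := by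
  unfold PySem.Int.toChars
  rw [if_neg (by omega)]
  intro hnil
  have h1 : 1 ≤ (Nat.toDigits 10 i.toNat).length := by
    unfold Nat.toDigits
    rw [Nat.toDigitsCore]
    split
    · simp
    · have := pvToDigitsCore_len 10 i.toNat (i.toNat / 10) [(i.toNat % 10).digitChar]
      simp at this; omega
  rw [hnil] at h1
  simp at h1

theorem pvLen_le_sum (l : List Nat) (h : ∀ x ∈ l, 1 ≤ x) : l.length ≤ l.sum := by
  induction l with
  | nil => simp
  | cons a t ih => simp_all; omega

theorem pvBase_len (n : Nat) :
    n + 1 ≤ ((PySem.List.pyRange 1 ((n : Int) + 2) 1).map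
      (fun i => (PySem.Int.toStr i).toList)).flatten.length := by
  rw [List.length_flatten, List.map_map]
  have hsum := pvLen_le_sum
    ((PySem.List.pyRange 1 ((n : Int) + 2) 1).map
      (List.length ∘ fun i => (PySem.Int.toStr i).toList))
    (by
      intro x hx
      simp at hx
      obtain ⟨i, hi, rfl⟩ := hx
      have := List.length_pos_of_ne_nil (pvToChars_ne_nil i (by omega))
      simp
      omega)
  have hlen : ((PySem.List.pyRange 1 ((n : Int) + 2) 1).map
      (List.length ∘ fun i => (PySem.Int.toStr i).toList)).length = n + 1 := by
    rw [List.length_map, PySem.List.length_pyRange_one]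
    omega
  rw [hlen] at hsum
  exact hsum

-- ===== VERDICT (by name: the statement is the Claim_ definition above) =====
theorem smallestNumber_spec : Claim_equal_smallestNumber := by
  intro pattern _
  show smallestNumber pattern = smallestNumber_alt pattern
  unfold smallestNumber smallestNumber_alt
  simp only [PySem.List.foldl_append_eq_flatMap, List.nil_append, List.flatMap_def, pvJoin_nil]
  have hbase := pvBase_len pattern.toList.length
  have hA := pvLoopA_eq pattern.toList []
    ((PySem.List.pyRange 1 ((pattern.toList.length : Int) + 2) 1).map
      (fun i => (PySem.Int.toStr i).toList)).flatten
    (by simp only [List.length_nil, Nat.zero_add]; omega)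
  simp only [List.nil_append, List.length_nil, List.drop_zero] at hA
  have hB := pvLoopB_eq pattern.toList 0
    ((PySem.List.pyRange 1 ((pattern.toList.length : Int) + 2) 1).map
      (fun i => (PySem.Int.toStr i).toList)).flatten [] (by omega)
  rw [Nat.cast_zero, List.drop_zero] at hB
  rw [hA, hB]
  simp
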